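-- pv_equiv track=rewrite | github.com/priyanshum17/SDOH-Signalboard | services/patient_repository.py | _condition_flags
-- ===== SOURCE A (Python) =====
-- from typing import Any, Dict, List, Tuple
--
-- DIABETES_CODES  = {"44054006", "73211009"}
--
-- HTN_CODES       = {"38341003"}
--
-- def _condition_flags(conditions: List[Dict[str, Any]]) -> Dict[str, bool]:
--     flags = {"diabetes": False, "hypertension": False}
--     for cond in conditions:
--         for cc in (cond.get("code", {}).get("coding") or []):
--             code_val = cc.get("code")
--             if code_val in DIABETES_CODES:
--                 flags["diabetes"] = True
--             if code_val in HTN_CODES: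
--                 flags["hypertension"] = True
--     return flags
-- ===== SOURCE B (Python) =====
-- from typing import Any, Dict, List, Tuple
--
-- DIABETES_CODES  = {"44054006", "73211009"}
--
-- HTN_CODES       = {"38341003"}
--
-- def _has_code(conditions: List[Dict[str, Any]], target: str) -> bool:
--     return any(cc.get("code") == target
--                for cond in conditions
--                for cc in (cond.get("code", {}).get("coding") or []))
--
-- def _condition_flags(conditions: List[Dict[str, Any]]) -> Dict[str, bool]:
--     return {"diabetes": _has_code(conditions, "44054006") or _has_code(conditions, "73211009"),
--             "hypertension": _has_code(conditions, "38341003")}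
-- ===== Notes on version B (the rewrite author's own statement) =====
-- stated objective: alternative
-- what changed: B inverts the search: instead of one pass threading two boolean flags through nested if-branches with set membership tests, it runs an independent short-circuiting search per target code (_has_code) and builds the result from three such searches, with no flag dict and no set membership at all.
import Mathlib
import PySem

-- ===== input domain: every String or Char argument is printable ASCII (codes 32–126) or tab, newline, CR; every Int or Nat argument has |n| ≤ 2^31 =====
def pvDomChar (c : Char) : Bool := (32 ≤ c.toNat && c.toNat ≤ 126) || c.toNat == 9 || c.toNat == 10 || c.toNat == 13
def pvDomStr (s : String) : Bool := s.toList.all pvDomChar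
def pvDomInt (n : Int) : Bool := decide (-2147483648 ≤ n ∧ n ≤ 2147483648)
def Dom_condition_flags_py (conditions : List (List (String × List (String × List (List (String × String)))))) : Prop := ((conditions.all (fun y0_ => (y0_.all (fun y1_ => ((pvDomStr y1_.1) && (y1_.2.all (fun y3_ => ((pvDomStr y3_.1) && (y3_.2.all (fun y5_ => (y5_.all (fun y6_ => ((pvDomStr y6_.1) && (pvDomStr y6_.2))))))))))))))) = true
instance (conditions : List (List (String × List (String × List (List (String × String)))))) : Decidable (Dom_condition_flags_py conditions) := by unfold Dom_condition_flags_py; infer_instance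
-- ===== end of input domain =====

-- B inverts the search: one independent short-circuiting search per target code instead of
-- one pass threading two flag updates through set-membership branches (objective: alternative).

-- The Python module's code sets, lifted to Option String (cc.get("code") may be None,
-- which is a member of neither set — exactly Python's behaviour).
def pvDIA : PySem.Set (Option String) := PySem.Set.ofList [some "44054006", some "73211009"]
def pvHTN : PySem.Set (Option String) := PySem.Set.ofList [some "38341003"]

-- ===== PORT A =====
-- the body of A's inner loop (one coding entry updates the flags dict)
def pvStep (flags : PySem.Dict String Bool) (cc : List (String × String)) : PySem.Dict String Bool :=
  let code_val := (PySem.Dict.mk cc).get? "code"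
  let flags := if PySem.Set.contains pvDIA code_val then flags.insert "diabetes" true else flags
  if PySem.Set.contains pvHTN code_val then flags.insert "hypertension" true else flags

-- the body of A's outer loop (one condition: run the inner loop over its codings)
def pvStepC (flags : PySem.Dict String Bool)
    (cond : List (String × List (String × List (List (String × String))))) : PySem.Dict String Bool :=
  ((PySem.Dict.mk (PySem.Dict.getD (PySem.Dict.mk cond) "code" [])).getD "coding" []).foldl pvStep flags

def condition_flags_py (conditions : List (List (String × List (String × List (List (String × String)))))) : List (String × Bool) :=
  let flags : PySem.Dict String Bool := (PySem.Dict.empty.insert "diabetes" false).insert "hypertension" false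
  let flags := conditions.foldl pvStepC flags
  flags.items

-- ===== PORT B =====
-- _has_code: short-circuiting search of the nested structure for one target code
def pvHasCode (conditions : List (List (String × List (String × List (List (String × String))))))
    (target : String) : Bool :=
  conditions.any (fun cond =>
    (((PySem.Dict.mk (PySem.Dict.getD (PySem.Dict.mk cond) "code" [])).getD "coding" []).any
      (fun cc => (PySem.Dict.mk cc).get? "code" == some target)))

def condition_flags_py_alt (conditions : List (List (String × List (String × List (List (String × String)))))) : List (String × Bool) :=
  [("diabetes", pvHasCode conditions "44054006" || pvHasCode conditions "73211009"),
   ("hypertension", pvHasCode conditions "38341003")]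

-- ===== PRECONDITION & SPEC =====
def Spec_condition_flags_py (conditions : List (List (String × List (String × List (List (String × String)))))) (out : List (String × Bool)) : Prop := out = condition_flags_py_alt conditions
instance (conditions : List (List (String × List (String × List (List (String × String)))))) (out : List (String × Bool)) : Decidable (Spec_condition_flags_py conditions out) := by unfold Spec_condition_flags_py; infer_instance

-- ===== CLAIM (what is proved, stated in full; the proofs are below) =====
def Claim_equal_condition_flags_py : Prop := ∀ (conditions : List (List (String × List (String × List (List (String × String)))))), Dom_condition_flags_py conditions → Spec_condition_flags_py conditions (condition_flags_py conditions)

-- ===== LEMMAS AND PROOFS =====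

-- the flags dict, parametrised by its two values
def pvD2 (d h : Bool) : PySem.Dict String Bool := PySem.Dict.mk [("diabetes", d), ("hypertension", h)]

-- the list of code values one condition contributes
def pvCodesOf (cond : List (String × List (String × List (List (String × String))))) : List (Option String) :=
  ((PySem.Dict.mk (PySem.Dict.getD (PySem.Dict.mk cond) "code" [])).getD "coding" []).map
    (fun cc => (PySem.Dict.mk cc).get? "code")

lemma pvInsertD (d h : Bool) : (pvD2 d h).insert "diabetes" true = pvD2 true h := by
  cases d <;> cases h <;> decide

lemma pvInsertH (d h : Bool) : (pvD2 d h).insert "hypertension" true = pvD2 d true := by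
  cases d <;> cases h <;> decide

lemma pvStep_D2 (d h : Bool) (cc : List (String × String)) :
    pvStep (pvD2 d h) cc
      = pvD2 (d || PySem.Set.contains pvDIA ((PySem.Dict.mk cc).get? "code"))
             (h || PySem.Set.contains pvHTN ((PySem.Dict.mk cc).get? "code")) := by
  unfold pvStep
  by_cases hd : PySem.Set.contains pvDIA ((PySem.Dict.mk cc).get? "code") = true <;>
    by_cases hh : PySem.Set.contains pvHTN ((PySem.Dict.mk cc).get? "code") = true <;>
      simp only [hd, hh, Bool.not_eq_true] at * <;>
        simp [pvInsertD, pvInsertH]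

lemma pvInner (ccs : List (List (String × String))) (d h : Bool) :
    ccs.foldl pvStep (pvD2 d h)
    = pvD2 (d || ccs.any (fun cc => PySem.Set.contains pvDIA ((PySem.Dict.mk cc).get? "code")))
           (h || ccs.any (fun cc => PySem.Set.contains pvHTN ((PySem.Dict.mk cc).get? "code"))) := by
  induction ccs generalizing d h with
  | nil => simp
  | cons cc rest ih =>
    rw [List.foldl_cons, pvStep_D2, ih]
    simp only [List.any_cons, Bool.or_assoc]

lemma pvStepC_D2 (d h : Bool) (cond : List (String × List (String × List (List (String × String))))) :
    pvStepC (pvD2 d h) cond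
      = pvD2 (d || (pvCodesOf cond).any (fun c => PySem.Set.contains pvDIA c))
             (h || (pvCodesOf cond).any (fun c => PySem.Set.contains pvHTN c)) := by
  unfold pvStepC
  rw [pvInner]
  simp only [pvCodesOf, List.any_map, Function.comp_def]

lemma pvOuter (conds : List (List (String × List (String × List (List (String × String)))))) (d h : Bool) :
    conds.foldl pvStepC (pvD2 d h)
    = pvD2 (d || conds.any (fun cond => (pvCodesOf cond).any (fun c => PySem.Set.contains pvDIA c)))
           (h || conds.any (fun cond => (pvCodesOf cond).any (fun c => PySem.Set.contains pvHTN c))) := by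
  induction conds generalizing d h with
  | nil => simp
  | cons cond rest ih =>
    rw [List.foldl_cons, pvStepC_D2, ih]
    simp only [List.any_cons, Bool.or_assoc]

-- pvHasCode as an 'any' over each condition's code list
lemma pvHasCode_eq (conds : List (List (String × List (String × List (List (String × String))))))
    (t : String) :
    pvHasCode conds t = conds.any (fun cond => (pvCodesOf cond).any (fun c => c == some t)) := by
  unfold pvHasCode
  simp only [pvCodesOf, List.any_map, Function.comp_def]

-- membership in the two-element diabetes set splits into two equality searches
lemma pvDIA_contains (c : Option String) :
    PySem.Set.contains pvDIA c = ((c == some "44054006") || (c == some "73211009")) := by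
  rw [Bool.eq_iff_iff, PySem.Set.contains_iff]
  simp [pvDIA, PySem.Set.mem_ofList]

lemma pvHTN_contains (c : Option String) :
    PySem.Set.contains pvHTN c = (c == some "38341003") := by
  rw [Bool.eq_iff_iff, PySem.Set.contains_iff]
  simp [pvHTN, PySem.Set.mem_ofList]

lemma pvAny_or {α : Type} (L : List α) (p q : α → Bool) :
    L.any (fun x => p x || q x) = (L.any p || L.any q) := by
  induction L with
  | nil => rfl
  | cons x rest ih => simp [List.any_cons, ih]; cases p x <;> cases q x <;> simp

-- ===== VERDICT (by name: the statement is the Claim_ definition above) =====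
theorem condition_flags_py_spec : Claim_equal_condition_flags_py := by
  intro conditions _
  have hinit : (PySem.Dict.empty.insert "diabetes" false).insert "hypertension" false
      = pvD2 false false := by decide
  unfold Spec_condition_flags_py
  simp only [condition_flags_py, condition_flags_py_alt]
  rw [hinit, pvOuter, pvHasCode_eq, pvHasCode_eq, pvHasCode_eq]
  simp only [pvDIA_contains, pvHTN_contains, pvAny_or, Bool.false_or, pvD2]
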